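-- pv_equiv track=rewrite | github.com/AbdullahHassan176/Valuation-Agent-backend | app/security/validator.py | _is_strong_api_key
-- ===== SOURCE A (Python) =====
-- def _is_strong_api_key(api_key: str) -> bool:
--     """Check if API key is cryptographically strong"""
--     if len(api_key) < 32:
--         return False
--
--     # Check for entropy (basic check)
--     has_upper = any(c.isupper() for c in api_key)
--     has_lower = any(c.islower() for c in api_key)
--     has_digit = any(c.isdigit() for c in api_key)
--     has_special = any(c in "!@#$%^&*()_+-=[]{}|;:,.<>?" for c in api_key)
--
--     return has_upper and has_lower and has_digit and has_special
-- ===== SOURCE B (Python) =====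
-- def _is_strong_api_key(api_key: str) -> bool:
--     """Check if API key is cryptographically strong"""
--     if len(api_key) < 32:
--         return False
--     has_upper = has_lower = has_digit = has_special = False
--     for c in api_key:
--         if c.isupper():
--             has_upper = True
--         if c.islower():
--             has_lower = True
--         if c.isdigit():
--             has_digit = True
--         if c in "!@#$%^&*()_+-=[]{}|;:,.<>?":
--             has_special = True
--         if has_upper and has_lower and has_digit and has_special:
--             return True
--     return False
-- ===== Notes on version B (the rewrite author's own statement) =====
-- stated objective: alternative
-- what changed: Replaced A's four separate any() scans over the key with a single fused loop that maintains four boolean flags and returns early once all four character classes have been seen.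
import Mathlib
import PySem

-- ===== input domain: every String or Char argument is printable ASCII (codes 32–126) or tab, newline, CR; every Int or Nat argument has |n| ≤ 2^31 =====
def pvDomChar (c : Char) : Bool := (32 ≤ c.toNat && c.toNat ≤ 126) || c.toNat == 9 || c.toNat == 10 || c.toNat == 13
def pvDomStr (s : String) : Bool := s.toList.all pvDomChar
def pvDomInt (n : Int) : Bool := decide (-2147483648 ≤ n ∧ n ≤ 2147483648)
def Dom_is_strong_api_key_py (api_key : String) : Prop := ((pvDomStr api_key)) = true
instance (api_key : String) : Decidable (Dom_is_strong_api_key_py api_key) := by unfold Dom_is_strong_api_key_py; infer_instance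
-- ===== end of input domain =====

-- B fuses A's four separate any() scans over the key into one loop that maintains
-- four flags and returns early once all are set (objective: alternative/simpler traversal).


-- ===== PORT A =====
-- the literal special-character set from the Python source
def pvSpecialChars : List Char := "!@#$%^&*()_+-=[]{}|;:,.<>?".toList

def is_strong_api_key_py (api_key : String) : Bool :=
  if api_key.toList.length < 32 then false
  else
    let has_upper := api_key.toList.any (fun c => PySem.Chars.isupper c)
    let has_lower := api_key.toList.any (fun c => PySem.Chars.islower c)
    let has_digit := api_key.toList.any (fun c => PySem.Chars.isdigit c)
    let has_special := api_key.toList.any (fun c => pvSpecialChars.contains c)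
    has_upper && has_lower && has_digit && has_special

-- ===== PORT B =====
-- one pass, four flags, early return once all four are set (Source B's loop)
def pvAltLoop : List Char → Bool → Bool → Bool → Bool → Bool
  | [], _, _, _, _ => false
  | c :: cs, u, l, d, s =>
    let u := u || PySem.Chars.isupper c
    let l := l || PySem.Chars.islower c
    let d := d || PySem.Chars.isdigit c
    let s := s || pvSpecialChars.contains c
    if u && l && d && s then true else pvAltLoop cs u l d s

def is_strong_api_key_py_alt (api_key : String) : Bool :=
  if api_key.toList.length < 32 then false
  else pvAltLoop api_key.toList false false false false

-- ===== PRECONDITION & SPEC =====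
def Spec_is_strong_api_key_py (api_key : String) (out : Bool) : Prop := out = is_strong_api_key_py_alt api_key
instance (api_key : String) (out : Bool) : Decidable (Spec_is_strong_api_key_py api_key out) := by unfold Spec_is_strong_api_key_py; infer_instance

-- ===== CLAIM (what is proved, stated in full; the proofs are below) =====
def Claim_equal_is_strong_api_key_py : Prop := ∀ (api_key : String), Dom_is_strong_api_key_py api_key → Spec_is_strong_api_key_py api_key (is_strong_api_key_py api_key)

-- ===== LEMMAS AND PROOFS =====

-- loop invariant: with not-yet-all-set flags, the fused loop computes the four any-scans
theorem pvAltLoop_eq (cs : List Char) : ∀ (u l d s : Bool), (u && l && d && s) = false →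
    pvAltLoop cs u l d s =
      ((u || cs.any (fun c => PySem.Chars.isupper c)) &&
       (l || cs.any (fun c => PySem.Chars.islower c)) &&
       (d || cs.any (fun c => PySem.Chars.isdigit c)) &&
       (s || cs.any (fun c => pvSpecialChars.contains c))) := by
  induction cs with
  | nil => intro u l d s h; simp [pvAltLoop, h]
  | cons c cs ih =>
    intro u l d s h
    simp only [pvAltLoop, List.any_cons]
    by_cases hall : ((u || PySem.Chars.isupper c) && (l || PySem.Chars.islower c) &&
        (d || PySem.Chars.isdigit c) && (s || pvSpecialChars.contains c)) = true
    · simp only [hall, if_true]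
      rw [Bool.and_assoc, Bool.and_assoc] at hall ⊢
      rcases Bool.and_eq_true_iff.mp hall with ⟨h1, h2⟩
      rcases Bool.and_eq_true_iff.mp h2 with ⟨h3, h4⟩
      rcases Bool.and_eq_true_iff.mp h4 with ⟨h5, h6⟩
      simp at h1 h3 h5 h6 ⊢
      tauto
    · rw [if_neg hall, ih _ _ _ _ (by simpa using hall)]
      simp [Bool.or_assoc]

theorem is_strong_api_key_py_eq (api_key : String) :
    is_strong_api_key_py api_key = is_strong_api_key_py_alt api_key := by
  unfold is_strong_api_key_py is_strong_api_key_py_alt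
  by_cases h : api_key.toList.length < 32
  · rw [if_pos h, if_pos h]
  · rw [if_neg h, if_neg h, pvAltLoop_eq _ false false false false rfl]
    simp

-- ===== VERDICT (by name: the statement is the Claim_ definition above) =====
theorem is_strong_api_key_py_spec : Claim_equal_is_strong_api_key_py := by
  intro api_key _
  exact (is_strong_api_key_py_eq api_key).symm ▸ rfl
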